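-- pv_equiv track=rewrite | github.com/lucabol/python-tournament-allocator | src/core/elimination.py | _generate_bracket_order
-- ===== SOURCE A (Python) =====
-- from typing import List, Dict, Tuple, Optional
--
-- def _generate_bracket_order(bracket_size: int) -> List[int]:
--     """
--     Generate the standard tournament bracket order.
--     This ensures that if all higher seeds win, they meet in the proper rounds.
--
--     For 8 teams: [1, 8, 4, 5, 2, 7, 3, 6]
--     This gives matchups: 1v8, 4v5, 2v7, 3v6
--     Winners: 1v4 side, 2v3 side
--     Final: 1v2 (if chalk)
--     """
--     if bracket_size == 2:
--         return [1, 2]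
--
--     # Recursive generation
--     half_size = bracket_size // 2
--     upper_half = _generate_bracket_order(half_size)
--
--     # Create lower half as complement
--     lower_half = [bracket_size + 1 - seed for seed in upper_half]
--
--     # Interleave: pair each upper seed with its complement
--     result = []
--     for u, l in zip(upper_half, lower_half):
--         result.extend([u, l])
--
--     return result
-- ===== SOURCE B (Python) =====
-- from typing import List
--
-- def _generate_bracket_order(bracket_size: int) -> List[int]:
--     # Bottom-up: collect the chain of bracket sizes down to the base case, then
--     # iteratively double the base seeding, pairing each seed with its
--     # complement at that level.
--     sizes = []
--     s = bracket_size
--     while s != 2: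
--         sizes.append(s)
--         s //= 2
--     result = [1, 2]
--     for size in reversed(sizes):
--         result = [x for u in result for x in (u, size + 1 - u)]
--     return result
-- ===== Notes on version B (the rewrite author's own statement) =====
-- stated objective: alternative
-- what changed: Replaced the top-down recursion by a bottom-up iteration: collect the chain of halved bracket sizes once, then iteratively double the base seeding, pairing each seed with its complement at each level.
-- outside the precondition, e.g. on _generate_bracket_order(3): A raises RecursionError, B does not finish within the time limit
import Mathlib
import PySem

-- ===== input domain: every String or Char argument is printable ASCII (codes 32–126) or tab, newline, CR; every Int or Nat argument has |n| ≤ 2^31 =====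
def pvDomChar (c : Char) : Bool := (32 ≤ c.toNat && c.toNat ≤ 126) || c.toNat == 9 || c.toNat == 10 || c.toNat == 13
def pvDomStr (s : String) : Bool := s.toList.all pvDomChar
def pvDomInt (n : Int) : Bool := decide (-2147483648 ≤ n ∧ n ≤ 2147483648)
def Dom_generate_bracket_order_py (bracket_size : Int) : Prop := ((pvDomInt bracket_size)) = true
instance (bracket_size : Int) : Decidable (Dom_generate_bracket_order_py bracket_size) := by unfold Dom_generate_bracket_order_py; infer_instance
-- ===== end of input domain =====

-- B replaces A's top-down recursion by a bottom-up loop: it first collects the chain of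
-- bracket sizes down to 2, then iteratively doubles the base seeding, pairing each seed with its
-- complement at that level (objective: alternative decomposition, same cost).


-- ===== PORT A =====
-- fuel makes the (not structurally decreasing) recursion total; inside Dom ∧ Pre_ the fuel 64 is never exhausted
def pvGoA (fuel : Nat) (bracket_size : Int) : List Int :=
  match fuel with
  | 0 => []
  | f + 1 =>
    if bracket_size = 2 then [1, 2]
    else
      let half_size := PySem.Int.floordiv bracket_size 2
      let upper_half := pvGoA f half_size
      let lower_half := upper_half.map (fun seed => bracket_size + 1 - seed)
      (upper_half.zip lower_half).foldl (fun result p => result ++ [p.1, p.2]) []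

def generate_bracket_order_py (bracket_size : Int) : List Int := pvGoA 64 bracket_size

-- ===== PORT B =====
-- fuel makes B's `while s != 2` loop total; inside Dom ∧ Pre_ the fuel 64 is never exhausted
def pvSizes (fuel : Nat) (s : Int) (acc : List Int) : List Int :=
  match fuel with
  | 0 => acc
  | f + 1 =>
    if s = 2 then acc
    else pvSizes f (PySem.Int.floordiv s 2) (acc ++ [s])

def generate_bracket_order_py_alt (bracket_size : Int) : List Int :=
  let sizes := pvSizes 64 bracket_size []
  sizes.reverse.foldl (fun result size => result.flatMap (fun u => [u, size + 1 - u])) [1, 2]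

-- ===== PRECONDITION & SPEC =====
-- Pre_ excludes exactly the inputs on which A does NOT return: A terminates iff repeated
-- floor-halving of bracket_size reaches the base case 2 (i.e. 2^(k+1) ≤ n < 3·2^k for some k,
-- stated in closed form with k = Nat.log 2 n - 1); on every other input A raises RecursionError
-- (and B's while-loop does not terminate either). No size cap: within Dom this is the full
-- termination domain of A.
def Pre_generate_bracket_order_py (bracket_size : Int) : Prop :=
  2 ≤ bracket_size ∧ bracket_size < 3 * 2 ^ (Nat.log 2 bracket_size.toNat - 1)
instance (bracket_size : Int) : Decidable (Pre_generate_bracket_order_py bracket_size) := by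
  unfold Pre_generate_bracket_order_py; infer_instance

def pvWitness_generate_bracket_order_py : Int := (8)

def Spec_generate_bracket_order_py (bracket_size : Int) (out : List Int) : Prop := out = generate_bracket_order_py_alt bracket_size
instance (bracket_size : Int) (out : List Int) : Decidable (Spec_generate_bracket_order_py bracket_size out) := by unfold Spec_generate_bracket_order_py; infer_instance

-- ===== CLAIM (what is proved, stated in full; the proofs are below) =====
def Claim_equal_generate_bracket_order_py : Prop := ∀ (bracket_size : Int), Dom_generate_bracket_order_py bracket_size → Pre_generate_bracket_order_py bracket_size → Spec_generate_bracket_order_py bracket_size (generate_bracket_order_py bracket_size)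

-- ===== LEMMAS AND PROOFS =====

-- A's zip-and-extend interleave equals one flatMap over the upper half
theorem pv_interleave_eq (u : List Int) (c : Int) (init : List Int) :
    ((u.zip (u.map (fun s => c - s))).foldl (fun r p => r ++ [p.1, p.2]) init)
      = init ++ u.flatMap (fun s => [s, c - s]) := by
  induction u generalizing init with
  | nil => simp
  | cons a t ih => simp [List.foldl_cons, ih, List.append_assoc]

theorem pvSizes_acc (f : Nat) : ∀ (n : Int) (acc : List Int),
    pvSizes f n acc = acc ++ pvSizes f n [] := by
  induction f with
  | zero => intro n acc; simp [pvSizes]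
  | succ f ih =>
    intro n acc
    by_cases h : n = 2
    · simp [pvSizes, h]
    · simp only [pvSizes, if_neg h]
      rw [ih _ (acc ++ [n]), ih _ ([] ++ [n])]
      simp [List.append_assoc]

theorem pv_main : ∀ (k : Nat) (n : Int) (fa fb : Nat), k + 1 ≤ fa → k + 1 ≤ fb →
    (2 : Int) ^ (k + 1) ≤ n → n < 3 * 2 ^ k →
    pvGoA fa n =
      (pvSizes fb n []).reverse.foldl (fun result size => result.flatMap (fun u => [u, size + 1 - u])) [1, 2] := by
  intro k
  induction k with
  | zero =>
    intro n fa fb hfa hfb h1 h2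
    have hn : n = 2 := by norm_num at h1 h2; omega
    obtain ⟨fa', rfl⟩ : ∃ m, fa = m + 1 := ⟨fa - 1, by omega⟩
    obtain ⟨fb', rfl⟩ : ∃ m, fb = m + 1 := ⟨fb - 1, by omega⟩
    simp [pvGoA, pvSizes, hn]
  | succ k ih =>
    intro n fa fb hfa hfb h1 h2
    have hp : (1 : Int) ≤ 2 ^ k := one_le_pow₀ (by norm_num)
    have e1 : (2 : Int) ^ (k + 1 + 1) = 4 * 2 ^ k := by ring
    have e2 : (2 : Int) ^ (k + 1) = 2 * 2 ^ k := by ring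
    have hn2 : n ≠ 2 := by rw [e1] at h1; omega
    have hdiv : PySem.Int.floordiv n 2 = n / 2 :=
      PySem.Int.floordiv_eq_ediv_of_pos (by norm_num)
    have hh1 : (2 : Int) ^ (k + 1) ≤ n / 2 := by rw [e1] at h1; rw [e2]; omega
    have hh2 : n / 2 < 3 * 2 ^ k := by rw [e2] at h2; omega
    obtain ⟨fa', rfl⟩ : ∃ m, fa = m + 1 := ⟨fa - 1, by omega⟩
    obtain ⟨fb', rfl⟩ : ∃ m, fb = m + 1 := ⟨fb - 1, by omega⟩
    have hB : pvSizes (fb' + 1) n [] = [n] ++ pvSizes fb' (n / 2) [] := by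
      simp only [pvSizes, if_neg hn2, hdiv]
      rw [pvSizes_acc]
      simp
    simp only [pvGoA, if_neg hn2, hdiv, hB]
    rw [pv_interleave_eq (pvGoA fa' (n / 2)) (n + 1) []]
    rw [List.reverse_append, List.foldl_append, ← ih (n / 2) fa' fb' (by omega) (by omega) hh1 hh2]
    simp

-- ===== VERDICT (by name: the statement is the Claim_ definition above) =====
theorem generate_bracket_order_py_spec : Claim_equal_generate_bracket_order_py := by
  intro n hdom hpre
  obtain ⟨h2, h3⟩ := hpre
  have hmn : ((n.toNat : Int)) = n := Int.toNat_of_nonneg (by omega)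
  have hlogpos : 0 < Nat.log 2 n.toNat := Nat.log_pos (by norm_num) (by omega)
  set k := Nat.log 2 n.toNat - 1 with hk
  have hk1 : k + 1 = Nat.log 2 n.toNat := by omega
  have hleNat : 2 ^ (k + 1) ≤ n.toNat := by
    rw [hk1]; exact Nat.pow_log_le_self 2 (by omega)
  have h1 : (2 : Int) ^ (k + 1) ≤ n := by
    calc (2 : Int) ^ (k + 1) = ((2 ^ (k + 1) : Nat) : Int) := by push_cast; ring
    _ ≤ ((n.toNat : Int)) := by exact_mod_cast hleNat
    _ = n := hmn
  -- fuel bound: from Dom, n ≤ 2^31, so k + 1 ≤ 31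
  have hub : n ≤ 2147483648 := by
    simp only [Dom_generate_bracket_order_py, pvDomInt, decide_eq_true_eq] at hdom
    exact hdom.2
  have hk31 : k + 1 ≤ 31 := by
    by_contra hcon
    have h32 : (2 : Int) ^ 32 ≤ 2 ^ (k + 1) :=
      pow_le_pow_right₀ (by norm_num) (by omega)
    norm_num at h32
    omega
  show generate_bracket_order_py n = generate_bracket_order_py_alt n
  simpa [generate_bracket_order_py, generate_bracket_order_py_alt] using
    pv_main k n 64 64 (by omega) (by omega) h1 h3
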